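-- pv_equiv track=rewrite | github.com/ChoHye0N/problem-solving | 백준/Bronze/2309. 일곱 난쟁이/일곱 난쟁이.py | Seven_Dwarfs
-- ===== SOURCE A (Python) =====
-- def Seven_Dwarfs(height):
--     for i in range(9):
--         for j in range(i+1, 9):
--             temp = list(height[:])
--             temp.pop(i)
--             temp.pop(j-1)
--             if sum(temp) == 100:
--                 temp.sort()
--                 return temp
-- ===== SOURCE B (Python) =====
-- def Seven_Dwarfs(height):
--     n = min(9, len(height))
--     target = sum(height) - 100          # the two heights to remove must sum to this
--     pos = {}                            # height value -> its indices (increasing) among the first nine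
--     for k in range(n):
--         pos[height[k]] = pos.get(height[k], []) + [k]
--     for i in range(n):
--         for j in pos.get(target - height[i], []):
--             if j > i:
--                 rest = [h for k, h in enumerate(height) if k != i and k != j]
--                 rest.sort()
--                 return rest
-- ===== Notes on version B (the rewrite author's own statement) =====
-- stated objective: faster
-- what changed: B replaces A's brute-force pair scan with a per-pair list rebuild/pop/pop/re-sum by a hash-index two-sum: it precomputes the total once, builds a dict mapping each height value to its indices, and for each i looks up the partner value total-100-height[i], taking its first index j>i (which is exactly A's lexicographically first pair); the remaining seven are built once by index exclusion. Pre_ is exactly the inputs where A returns a list: it excludes inputs where A returns None (no removable pair) or raises IndexError (the fixed range(9) scan runs past the end of a short list).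
-- outside the precondition, e.g. on Seven_Dwarfs([1, 1, 1, 1, 1, 1, 1, 1, 1]): A returns None, B returns None; on Seven_Dwarfs([1, 2]): A raises IndexError, B returns None
import Mathlib
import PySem

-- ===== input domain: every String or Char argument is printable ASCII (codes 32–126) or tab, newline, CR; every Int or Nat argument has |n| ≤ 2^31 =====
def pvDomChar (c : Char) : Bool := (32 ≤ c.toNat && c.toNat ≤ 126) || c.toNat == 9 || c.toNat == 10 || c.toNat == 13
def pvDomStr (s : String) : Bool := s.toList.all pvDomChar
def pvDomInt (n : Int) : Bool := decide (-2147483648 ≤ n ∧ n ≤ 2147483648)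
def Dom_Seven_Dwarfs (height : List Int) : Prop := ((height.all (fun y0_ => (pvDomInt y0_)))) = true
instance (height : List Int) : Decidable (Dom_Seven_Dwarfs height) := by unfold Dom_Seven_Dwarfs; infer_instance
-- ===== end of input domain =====

-- B replaces A's brute-force pair scan (rebuild/pop/pop/re-sum per pair) by a hash-index
-- two-sum: one precomputed total, a dict from height value to its indices, and per i a
-- lookup of the partner value, taking the first partner index j > i (A's first pair).

-- ===== PORT A =====
-- inner 'for j in range(i+1, 9)' with early return; none = fell through (or IndexError, outside Pre_)
def sevenA_inner (height : List Int) (i : Int) : List Int → Option (List Int)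
  | [] => none
  | j :: js =>
    match PySem.List.pop? height i with
    | none => none
    | some (_, t1) =>
      match PySem.List.pop? t1 (j - 1) with
      | none => none
      | some (_, t2) =>
        if t2.sum == 100 then some (PySem.List.sorted t2 (fun x => x) false)
        else sevenA_inner height i js

-- outer 'for i in range(9)'
def sevenA_outer (height : List Int) : List Int → Option (List Int)
  | [] => none
  | i :: is =>
    match sevenA_inner height i (PySem.List.pyRange (i + 1) 9 1) with
    | some r => some r
    | none => sevenA_outer height is

def Seven_Dwarfs (height : List Int) : List Int :=
  (sevenA_outer height (PySem.List.pyRange 0 9 1)).getD []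

-- ===== PORT B =====
-- 'pos[height[k]] = pos.get(height[k], []) + [k]' over k in range(n);
-- pyGetD is exact here: every scanned index is < n ≤ len(height)
def sevenB_pos (height : List Int) (n : Int) : PySem.Dict Int (List Int) :=
  (PySem.List.pyRange 0 n 1).foldl
    (fun pos k =>
      pos.insert (PySem.List.pyGetD height k 0)
        (pos.getD (PySem.List.pyGetD height k 0) [] ++ [k]))
    PySem.Dict.empty

-- 'rest = [h for k, h in enumerate(height) if k != i and k != j]'
def sevenB_rest (height : List Int) (i j : Int) : List Int :=
  ((PySem.List.enumerate height).filter (fun kv => kv.1 != i && kv.1 != j)).map Prod.snd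

-- 'for j in pos.get(target - height[i], []): if j > i: return sorted(rest)'
def sevenB_scan (height : List Int) (i : Int) : List Int → Option (List Int)
  | [] => none
  | j :: js =>
    if i < j then some (PySem.List.sorted (sevenB_rest height i j) (fun x => x) false)
    else sevenB_scan height i js

-- 'for i in range(n)'
def sevenB_outer (height : List Int) (target : Int) (pos : PySem.Dict Int (List Int)) :
    List Int → Option (List Int)
  | [] => none
  | i :: is =>
    match sevenB_scan height i (pos.getD (target - PySem.List.pyGetD height i 0) []) with
    | some r => some r
    | none => sevenB_outer height target pos is

def Seven_Dwarfs_alt (height : List Int) : List Int :=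
  (sevenB_outer height (height.sum - 100)
      (sevenB_pos height (min 9 (height.length : Int)))
      (PySem.List.pyRange 0 (min 9 (height.length : Int)) 1)).getD []

-- ===== PRECONDITION & SPEC =====
-- Pre_ is exactly where A returns a list: some removable pair reached before the fixed
-- range(9) scan runs past the end of the list (otherwise A raises IndexError or returns None).
def Pre_Seven_Dwarfs (height : List Int) : Prop :=
  (9 ≤ height.length ∧
    ∃ i ∈ List.range 9, ∃ j ∈ List.range 9,
      i < j ∧ height.sum - height.getD i 0 - height.getD j 0 = 100) ∨
  (height.length < 9 ∧
    ∃ j ∈ List.range height.length,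
      1 ≤ j ∧ height.sum - height.getD 0 0 - height.getD j 0 = 100)
instance (height : List Int) : Decidable (Pre_Seven_Dwarfs height) := by
  unfold Pre_Seven_Dwarfs; infer_instance

def pvWitness_Seven_Dwarfs : List Int := [20, 7, 23, 19, 10, 15, 25, 8, 13]

def Spec_Seven_Dwarfs (height : List Int) (out : List Int) : Prop := out = Seven_Dwarfs_alt height
instance (height : List Int) (out : List Int) : Decidable (Spec_Seven_Dwarfs height out) := by unfold Spec_Seven_Dwarfs; infer_instance

-- ===== CLAIM (what is proved, stated in full; the proofs are below) =====
def Claim_equal_Seven_Dwarfs : Prop := ∀ (height : List Int), Dom_Seven_Dwarfs height → Pre_Seven_Dwarfs height → Spec_Seven_Dwarfs height (Seven_Dwarfs height)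

-- ===== LEMMAS AND PROOFS =====

theorem find?_congr_mem {α : Type} {l : List α} {p q : α → Bool}
    (h : ∀ x ∈ l, p x = q x) : l.find? p = l.find? q := by
  induction l with
  | nil => rfl
  | cons x t ih =>
    rw [List.find?_cons, List.find?_cons, h x (by simp)]
    cases q x
    · exact ih (fun y hy => h y (by simp [hy]))
    · rfl

theorem sum_eraseIdx_int (l : List Int) (i : Nat) (h : i < l.length) :
    (l.eraseIdx i).sum = l.sum - l[i] := by
  induction l generalizing i with
  | nil => simp at h
  | cons x t ih =>
    cases i with
    | zero => simp
    | succ n =>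
      simp only [List.eraseIdx_cons_succ, List.sum_cons, List.getElem_cons_succ]
      rw [ih n (by simpa using h)]
      ring

theorem sum_eraseIdx_two (l : List Int) (i j : Nat) (hij : i < j) (hj : j < l.length) :
    ((l.eraseIdx i).eraseIdx (j - 1)).sum = l.sum - l[i] - l[j] := by
  have hi : i < l.length := lt_trans hij hj
  have h1 : j - 1 < (l.eraseIdx i).length := by
    rw [List.length_eraseIdx_of_lt hi]; omega
  have h2 : (l.eraseIdx i)[j - 1]'h1 = l[j] := by
    rw [List.getElem_eraseIdx_of_ge h1 (by omega)]
    congr 1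
    omega
  rw [sum_eraseIdx_int _ _ h1, h2, sum_eraseIdx_int _ _ hi]

theorem enumerate_shift {α : Type} (l : List α) (s : Int) :
    PySem.List.enumerate l (s + 1) = (PySem.List.enumerate l s).map (fun kv => (kv.1 + 1, kv.2)) := by
  induction l generalizing s with
  | nil => simp [PySem.List.enumerate_nil]
  | cons x t ih => simp [PySem.List.enumerate_cons, ih]

theorem enumerate_fst_nonneg {α : Type} (l : List α) (s : Int) :
    ∀ kv ∈ PySem.List.enumerate l s, s ≤ kv.1 := by
  induction l generalizing s with
  | nil => simp [PySem.List.enumerate_nil]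
  | cons x t ih =>
    intro kv hkv
    rw [PySem.List.enumerate_cons] at hkv
    rcases List.mem_cons.mp hkv with h | h
    · simp [h]
    · have := ih (s + 1) kv h; omega

theorem eraseIdx_cons_pos (x : Int) (L : List Int) (n : Nat) (h : 0 < n) :
    (x :: L).eraseIdx n = x :: L.eraseIdx (n - 1) := by
  cases n with
  | zero => omega
  | succ m => simp [List.eraseIdx_cons_succ]

theorem bne_congr (a b c d : Int) (h : (a = b) ↔ (c = d)) : (a != b) = (c != d) := by
  by_cases hab : a = b
  · rw [show (a != b) = false by rw [bne_eq_false_iff_eq]; exact hab,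
      show (c != d) = false by rw [bne_eq_false_iff_eq]; exact h.mp hab]
  · rw [show (a != b) = true by rw [bne_iff_ne]; exact hab,
      show (c != d) = true by rw [bne_iff_ne]; exact fun hc => hab (h.mpr hc)]

theorem beq_congr (a b c d : Int) (h : (a = b) ↔ (c = d)) : (a == b) = (c == d) := by
  by_cases hab : a = b
  · rw [show (a == b) = true by rw [beq_iff_eq]; exact hab,
      show (c == d) = true by rw [beq_iff_eq]; exact h.mp hab]
  · rw [show (a == b) = false by rw [beq_eq_false_iff_ne]; exact hab,
      show (c == d) = false by rw [beq_eq_false_iff_ne]; exact fun hc => hab (h.mpr hc)]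

theorem map_snd_filter_shift (t : List Int) (P : Int → Bool) :
    ((((PySem.List.enumerate t 0).map (fun kv : Int × Int => (kv.1 + 1, kv.2))).filter
        (fun kv => P kv.1)).map Prod.snd)
      = ((PySem.List.enumerate t 0).filter (fun kv => P (kv.1 + 1))).map Prod.snd := by
  rw [List.filter_map, List.map_map]
  rfl

theorem filter_enumerate_one (l : List Int) (i : Int) (hi : 0 ≤ i) :
    ((PySem.List.enumerate l 0).filter (fun kv => kv.1 != i)).map Prod.snd
      = l.eraseIdx i.toNat := by
  induction l generalizing i with
  | nil => simp [PySem.List.enumerate_nil]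
  | cons x t ih =>
    rw [PySem.List.enumerate_cons, show (0 : Int) + 1 = 0 + 1 by norm_num, enumerate_shift,
      List.filter_cons]
    by_cases h0 : i = 0
    · subst h0
      rw [if_neg (by simp)]
      rw [map_snd_filter_shift t (fun n => n != 0)]
      rw [List.filter_congr (q := fun _ => true)
        (by intro kv hkv; have := enumerate_fst_nonneg t 0 kv hkv
            simp only [bne_iff_ne, ne_eq]
            omega)]
      simp [PySem.List.map_snd_enumerate]
    · have hpos : 0 < i := lt_of_le_of_ne hi (Ne.symm h0)
      rw [if_pos (by simp only [bne_iff_ne, ne_eq]; omega)]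
      rw [List.map_cons, map_snd_filter_shift t (fun n => n != i)]
      rw [List.filter_congr (q := fun kv : Int × Int => kv.1 != i - 1)
        (by intro kv hkv; have := enumerate_fst_nonneg t 0 kv hkv
            exact bne_congr _ _ _ _ (by constructor <;> intro <;> omega))]
      rw [ih (i - 1) (by omega)]
      rw [eraseIdx_cons_pos x t i.toNat (by omega)]
      rw [show (i - 1).toNat = i.toNat - 1 by omega]

theorem filter_enumerate_two (l : List Int) (i j : Int) (hi : 0 ≤ i) (hij : i < j) :
    sevenB_rest l i j = (l.eraseIdx i.toNat).eraseIdx (j.toNat - 1) := by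
  induction l generalizing i j with
  | nil => simp [sevenB_rest, PySem.List.enumerate_nil]
  | cons x t ih =>
    show ((PySem.List.enumerate (x :: t) 0).filter
        (fun kv => kv.1 != i && kv.1 != j)).map Prod.snd = _
    rw [PySem.List.enumerate_cons, show (0 : Int) + 1 = 0 + 1 by norm_num, enumerate_shift,
      List.filter_cons]
    by_cases h0 : i = 0
    · subst h0
      rw [if_neg (by simp)]
      rw [map_snd_filter_shift t (fun n => n != 0 && n != j)]
      rw [List.filter_congr (q := fun kv : Int × Int => kv.1 != j - 1)
        (by intro kv hkv; have := enumerate_fst_nonneg t 0 kv hkv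
            rw [show (kv.1 + 1 != (0:Int)) = true from by simp [bne_iff_ne]; omega,
              Bool.true_and]
            exact bne_congr _ _ _ _ (by constructor <;> intro <;> omega))]
      rw [filter_enumerate_one t (j - 1) (by omega)]
      rw [show (x :: t).eraseIdx (0 : Int).toNat = t by simp]
      rw [show (j - 1).toNat = j.toNat - 1 by omega]
    · have hpos : 0 < i := lt_of_le_of_ne hi (Ne.symm h0)
      rw [if_pos (show (((0:Int), x).1 != i && ((0:Int), x).1 != j) = true from by
        simp [bne_iff_ne]; omega)]
      rw [List.map_cons, map_snd_filter_shift t (fun n => n != i && n != j)]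
      rw [List.filter_congr (q := fun kv : Int × Int => kv.1 != (i - 1) && kv.1 != (j - 1))
        (by intro kv hkv; have := enumerate_fst_nonneg t 0 kv hkv
            rw [bne_congr (kv.1 + 1) i kv.1 (i - 1) (by constructor <;> intro <;> omega),
              bne_congr (kv.1 + 1) j kv.1 (j - 1) (by constructor <;> intro <;> omega)])]
      have hrec := ih (i - 1) (j - 1) (by omega) (by omega)
      unfold sevenB_rest at hrec
      rw [hrec]
      rw [show (i - 1).toNat = i.toNat - 1 by omega, show (j - 1).toNat = j.toNat - 1 by omega]
      rw [eraseIdx_cons_pos x t i.toNat (by omega)]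
      rw [eraseIdx_cons_pos x (t.eraseIdx (i.toNat - 1)) (j.toNat - 1) (by omega)]

-- A's inner loop, when every scanned j is in range, is a find? over the scan list
theorem A_inner_eq_find (l : List Int) (i : Nat) (hi : i < l.length) :
    ∀ js : List Int, (∀ j ∈ js, (i : Int) < j ∧ j < l.length) →
    sevenA_inner l (i : Int) js
      = (js.find? (fun j => ((l.eraseIdx i).eraseIdx (j.toNat - 1)).sum == 100)).map
          (fun j => PySem.List.sorted ((l.eraseIdx i).eraseIdx (j.toNat - 1)) (fun x => x) false) := by
  intro js
  induction js with
  | nil => intro _; rfl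
  | cons j t ih =>
    intro hmem
    have hj := hmem j (by simp)
    obtain ⟨m, rfl⟩ := Int.eq_ofNat_of_zero_le (show (0:Int) ≤ j by omega)
    have him : i < m := by exact_mod_cast hj.1
    have hm : m < l.length := by exact_mod_cast hj.2
    rw [sevenA_inner, List.find?_cons]
    have hm1 : ((m : Int) - 1) = ((m - 1 : Nat) : Int) := by
      push_cast [Nat.cast_sub (by omega : 1 ≤ m)]; ring
    have h2 : m - 1 < (l.eraseIdx i).length := by
      rw [List.length_eraseIdx_of_lt hi]; omega
    simp only [PySem.List.pop?_natCast l i hi, hm1,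
      PySem.List.pop?_natCast (l.eraseIdx i) (m - 1) h2, Int.toNat_natCast]
    cases hc : (((l.eraseIdx i).eraseIdx (m - 1)).sum == 100)
    · rw [if_neg (by simp)]
      exact ih (fun x hx => hmem x (by simp [hx]))
    · rw [if_pos (by simp)]
      rfl

-- A's inner loop returns as soon as find? succeeds on an in-range prefix
theorem A_inner_append_found (l : List Int) (i : Nat) (hi : i < l.length) (j0 : Int) :
    ∀ js1 js2 : List Int, (∀ j ∈ js1, (i : Int) < j ∧ j < l.length) →
    js1.find? (fun j => ((l.eraseIdx i).eraseIdx (j.toNat - 1)).sum == 100) = some j0 →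
    sevenA_inner l (i : Int) (js1 ++ js2)
      = some (PySem.List.sorted ((l.eraseIdx i).eraseIdx (j0.toNat - 1)) (fun x => x) false) := by
  intro js1
  induction js1 with
  | nil => intro js2 _ hf; simp at hf
  | cons j t ih =>
    intro js2 hmem hf
    have hj := hmem j (by simp)
    obtain ⟨m, rfl⟩ := Int.eq_ofNat_of_zero_le (show (0:Int) ≤ j by omega)
    have him : i < m := by exact_mod_cast hj.1
    have hm : m < l.length := by exact_mod_cast hj.2
    rw [List.cons_append, sevenA_inner]
    rw [List.find?_cons] at hf
    simp only [Int.toNat_natCast] at hf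
    have hm1 : ((m : Int) - 1) = ((m - 1 : Nat) : Int) := by
      push_cast [Nat.cast_sub (by omega : 1 ≤ m)]; ring
    have h2 : m - 1 < (l.eraseIdx i).length := by
      rw [List.length_eraseIdx_of_lt hi]; omega
    simp only [PySem.List.pop?_natCast l i hi, hm1,
      PySem.List.pop?_natCast (l.eraseIdx i) (m - 1) h2]
    cases hc : (((l.eraseIdx i).eraseIdx (m - 1)).sum == 100)
    · rw [hc] at hf
      rw [if_neg (by simp)]
      exact ih js2 (fun x hx => hmem x (by simp [hx])) hf
    · rw [hc] at hf
      simp only [Option.some.injEq] at hf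
      subst hf
      rw [if_pos (by simp)]
      simp

-- B's partner scan is a find? of the first j > i
theorem B_scan_eq_find (l : List Int) (i : Int) :
    ∀ js : List Int, sevenB_scan l i js
      = (js.find? (fun j => decide (i < j))).map
          (fun j => PySem.List.sorted (sevenB_rest l i j) (fun x => x) false) := by
  intro js
  induction js with
  | nil => rfl
  | cons j t ih =>
    rw [sevenB_scan, List.find?_cons]
    by_cases h : i < j
    · rw [if_pos h, show decide (i < j) = true by simpa]
      rfl
    · rw [if_neg h, show decide (i < j) = false by simp only [decide_eq_false_iff_not]; exact h, ih]

-- the index dict: pos.getD v [] collects, in order, the scanned indices whose value is v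
theorem pos_getD_aux (l : List Int) :
    ∀ (ks : List Int) (d : PySem.Dict Int (List Int)) (v : Int),
    ((ks.foldl (fun pos k =>
        pos.insert (PySem.List.pyGetD l k 0)
          (pos.getD (PySem.List.pyGetD l k 0) [] ++ [k])) d).getD v [])
      = d.getD v [] ++ ks.filter (fun k => PySem.List.pyGetD l k 0 == v) := by
  intro ks
  induction ks with
  | nil => intro d v; simp
  | cons k t ih =>
    intro d v
    rw [List.foldl_cons, ih, List.filter_cons]
    by_cases hv : PySem.List.pyGetD l k 0 = v
    · rw [hv, PySem.Dict.getD_insert_self, if_pos (by simp)]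
      simp
    · rw [PySem.Dict.getD_insert_of_ne _ _ _ (fun h => hv h.symm), if_neg (by simp [hv])]

theorem pos_getD (l : List Int) (n v : Int) :
    (sevenB_pos l n).getD v []
      = (PySem.List.pyRange 0 n 1).filter (fun k => PySem.List.pyGetD l k 0 == v) := by
  unfold sevenB_pos
  rw [pos_getD_aux]
  rfl

-- the value test against the partner value equals A's sum test, for in-range i < j
theorem cond_equiv (l : List Int) (i j : Nat) (hij : i < j) (hj : j < l.length) :
    (PySem.List.pyGetD l (j : Int) 0 == l.sum - 100 - PySem.List.pyGetD l (i : Int) 0)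
      = (((l.eraseIdx i).eraseIdx (j - 1)).sum == 100) := by
  have hjg := PySem.List.pyGetD_eq_getElem l (i := (j : Int)) 0 (by omega) (by exact_mod_cast hj)
  have hig := PySem.List.pyGetD_eq_getElem l (i := (i : Int)) 0 (by omega)
    (by exact_mod_cast (lt_trans hij hj))
  simp only [Int.toNat_natCast] at hjg hig
  rw [hjg, hig, sum_eraseIdx_two l i j hij hj]
  exact beq_congr _ _ _ _ (by constructor <;> intro <;> omega)

-- B's inner loop at index i (0 ≤ i < n) = find? of the combined test over pyRange (i+1) n
theorem B_inner_eq_find (l : List Int) (n : Int) (i : Nat) (hin : (i : Int) < n) :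
    sevenB_scan l (i : Int)
        ((sevenB_pos l n).getD (l.sum - 100 - PySem.List.pyGetD l (i : Int) 0) [])
      = ((PySem.List.pyRange ((i : Int) + 1) n 1).find?
            (fun j => PySem.List.pyGetD l j 0 == l.sum - 100 - PySem.List.pyGetD l (i : Int) 0)).map
          (fun j => PySem.List.sorted (sevenB_rest l (i : Int) j) (fun x => x) false) := by
  rw [B_scan_eq_find, pos_getD, List.find?_filter]
  rw [PySem.List.pyRange_one_append 0 ((i : Int) + 1) n (by omega) (by omega),
    List.find?_append]
  have h1 : (PySem.List.pyRange 0 ((i : Int) + 1) 1).find?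
      (fun a => decide ((PySem.List.pyGetD l a 0 == l.sum - 100 - PySem.List.pyGetD l (i : Int) 0) = true
        ∧ decide ((i : Int) < a) = true)) = none := by
    rw [List.find?_eq_none]
    intro x hx
    have hb := PySem.List.mem_pyRange_one.mp hx
    simp only [decide_eq_true_eq]
    rintro ⟨-, h2⟩
    omega
  rw [h1, Option.none_or]
  congr 1
  apply find?_congr_mem
  intro x hx
  have hb := PySem.List.mem_pyRange_one.mp hx
  have hlt : decide ((i : Int) < x) = true := by rw [decide_eq_true_eq]; omega
  simp only [Bool.decide_and, Bool.decide_coe, hlt, decide_true, Bool.and_true]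

-- at an in-range match index, B's rest equals A's double eraseIdx
theorem rest_eq (l : List Int) (i : Nat) (j : Int) (hij : (i : Int) < j) :
    PySem.List.sorted (sevenB_rest l (i : Int) j) (fun x => x) false
      = PySem.List.sorted ((l.eraseIdx i).eraseIdx (j.toNat - 1)) (fun x => x) false := by
  rw [filter_enumerate_two l (i : Int) j (by omega) hij, Int.toNat_natCast]

-- per-index inner equality in the len ≥ 9 case
theorem inner_eq_nine (l : List Int) (h9 : 9 ≤ l.length) (i : Nat) (hi9 : i < 9) :
    sevenA_inner l (i : Int) (PySem.List.pyRange ((i : Int) + 1) 9 1)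
      = sevenB_scan l (i : Int)
          ((sevenB_pos l 9).getD (l.sum - 100 - PySem.List.pyGetD l (i : Int) 0) []) := by
  have hi : i < l.length := by omega
  rw [A_inner_eq_find l i hi _ (by
    intro j hj
    have := PySem.List.mem_pyRange_one.mp hj
    constructor
    · omega
    · omega)]
  rw [B_inner_eq_find l 9 i (by exact_mod_cast hi9)]
  rw [find?_congr_mem (p := fun j => ((l.eraseIdx i).eraseIdx (j.toNat - 1)).sum == 100)
    (q := fun j => PySem.List.pyGetD l j 0 == l.sum - 100 - PySem.List.pyGetD l (i : Int) 0)
    (by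
      intro j hj
      have hb := PySem.List.mem_pyRange_one.mp hj
      obtain ⟨m, rfl⟩ := Int.eq_ofNat_of_zero_le (show (0:Int) ≤ j by omega)
      have him : i < m := by exact_mod_cast (by omega : (i:Int) < m)
      have hm : m < l.length := by omega
      simpa using (cond_equiv l i m him hm).symm)]
  cases hf : (PySem.List.pyRange ((i : Int) + 1) 9 1).find?
      (fun j => PySem.List.pyGetD l j 0 == l.sum - 100 - PySem.List.pyGetD l (i : Int) 0) with
  | none => rfl
  | some j =>
    have hj := PySem.List.mem_pyRange_one.mp (List.mem_of_find?_eq_some hf)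
    simp only [Option.map_some]
    rw [rest_eq l i j (by omega)]

-- outer loops agree elementwise in the len ≥ 9 case
theorem outer_eq_nine (l : List Int) (h9 : 9 ≤ l.length) :
    ∀ is : List Int, (∀ i ∈ is, 0 ≤ i ∧ i < 9) →
    sevenA_outer l is = sevenB_outer l (l.sum - 100) (sevenB_pos l 9) is := by
  intro is
  induction is with
  | nil => intro _; rfl
  | cons i t ih =>
    intro hmem
    have hi := hmem i (by simp)
    obtain ⟨m, rfl⟩ := Int.eq_ofNat_of_zero_le hi.1
    have hm9 : m < 9 := by exact_mod_cast hi.2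
    rw [sevenA_outer, sevenB_outer, inner_eq_nine l h9 m hm9]
    rw [ih (fun x hx => hmem x (by simp [hx]))]

theorem seven_eq (l : List Int) (hpre : Pre_Seven_Dwarfs l) :
    Seven_Dwarfs l = Seven_Dwarfs_alt l := by
  unfold Seven_Dwarfs Seven_Dwarfs_alt
  rcases hpre with ⟨h9, _⟩ | ⟨hlt, j, hjmem, hj1, hjsum⟩
  · -- len ≥ 9: n = 9 and the loops agree index by index
    have hn : min (9 : Int) (l.length : Int) = 9 := by omega
    rw [hn, outer_eq_nine l h9 _ (by
      intro i hi
      have := PySem.List.mem_pyRange_one.mp hi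
      omega)]
  · -- len < 9: the first pair is (0, j*) and both loops return it at i = 0
    have hjlen : j < l.length := List.mem_range.mp hjmem
    have hlen2 : 2 ≤ l.length := by omega
    have hn : min (9 : Int) (l.length : Int) = (l.length : Int) := by omega
    -- the first matching partner index j0 in (0, len)
    have hex : ∃ x ∈ PySem.List.pyRange (0 + 1 : Int) (l.length : Int) 1,
        (fun j => ((l.eraseIdx (0 : Nat)).eraseIdx (j.toNat - 1)).sum == 100) x = true := by
      refine ⟨(j : Int), PySem.List.mem_pyRange_one.mpr (by constructor <;> omega), ?_⟩
      simp only [Int.toNat_natCast]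
      rw [sum_eraseIdx_two l 0 j (by omega) hjlen]
      have e0 : l.getD 0 0 = l[0]'(by omega) := List.getD_eq_getElem l 0 (by omega)
      have ej : l.getD j 0 = l[j]'hjlen := List.getD_eq_getElem l 0 hjlen
      rw [e0, ej] at hjsum
      simp only [beq_iff_eq]
      omega
    obtain ⟨j0, hf⟩ := Option.isSome_iff_exists.mp (List.find?_isSome.mpr hex)
    have hj0mem := PySem.List.mem_pyRange_one.mp (List.mem_of_find?_eq_some hf)
    -- A's side: i = 0, inner over pyRange 1 9 = pyRange 1 len ++ pyRange len 9
    have hA := A_inner_append_found l 0 (by omega) j0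
      (PySem.List.pyRange (0 + 1 : Int) (l.length : Int) 1)
      (PySem.List.pyRange (l.length : Int) 9 1)
      (by intro x hx
          have := PySem.List.mem_pyRange_one.mp hx
          constructor
          · simp only [Nat.cast_zero]; omega
          · omega)
      hf
    simp only [Nat.cast_zero] at hA
    -- B's side: i = 0, same first match
    have hB0 := B_inner_eq_find l (l.length : Int) 0 (by simp only [Nat.cast_zero]; omega)
    simp only [Nat.cast_zero] at hB0
    rw [find?_congr_mem
      (p := fun j => PySem.List.pyGetD l j 0 == l.sum - 100 - PySem.List.pyGetD l 0 0)
      (q := fun j => ((l.eraseIdx (0 : Nat)).eraseIdx (j.toNat - 1)).sum == 100)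
      (by
        intro x hx
        have hb := PySem.List.mem_pyRange_one.mp hx
        obtain ⟨m, rfl⟩ := Int.eq_ofNat_of_zero_le (show (0:Int) ≤ x by omega)
        have hm : m < l.length := by exact_mod_cast hb.2
        simpa using cond_equiv l 0 m (by exact_mod_cast hb.1) hm)] at hB0
    rw [hf] at hB0
    simp only [Option.map_some] at hB0
    have hr := rest_eq l 0 j0 (by simp only [Nat.cast_zero]; omega)
    simp only [Nat.cast_zero] at hr
    rw [hr] at hB0
    -- assemble
    rw [show PySem.List.pyRange 0 9 1 = 0 :: PySem.List.pyRange (0 + 1) 9 1 from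
        PySem.List.pyRange_one_cons (by omega),
      sevenA_outer,
      show PySem.List.pyRange (0 + 1) 9 1
          = PySem.List.pyRange (0 + 1 : Int) (l.length : Int) 1
            ++ PySem.List.pyRange (l.length : Int) 9 1 from
        PySem.List.pyRange_one_append _ _ _ (by omega) (by omega),
      hA]
    rw [hn,
      show PySem.List.pyRange 0 (l.length : Int) 1
          = 0 :: PySem.List.pyRange (0 + 1 : Int) (l.length : Int) 1 from
        PySem.List.pyRange_one_cons (by omega),
      sevenB_outer, hB0]

-- ===== VERDICT (by name: the statement is the Claim_ definition above) =====
theorem Seven_Dwarfs_spec : Claim_equal_Seven_Dwarfs := by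
  intro height _hdom hpre
  unfold Spec_Seven_Dwarfs
  exact seven_eq height hpre
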